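-- pv_equiv track=rewrite | github.com/HienHoang1101/nckh-jssp | algorithms/gt/giffler_thompson.py | build_conflict_set
-- ===== SOURCE A (Python) =====
-- def compute_earliest_times(eligible, jobs, job_completion_time, machine_available):
--     """
--     For each eligible operation, compute:
--       - Earliest Start (ES) = max(job_completion_time[j], machine_available[m])
--       - Earliest Completion (EC) = ES + processing_time
--
--     The ES respects both:
--       (a) Job precedence: cannot start until previous op of same job finishes
--       (b) Machine capacity: cannot start until machine is free
--
--     Returns:
--         dict: (job_id, op_idx) -> (machine, proc_time, ES, EC)
--     """
--     info = {}
--     for (j, op_idx) in eligible: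
--         m, p = jobs[j][op_idx]
--         es = max(job_completion_time[j], machine_available[m])
--         ec = es + p
--         info[(j, op_idx)] = (m, p, es, ec)
--     return info
--
-- def build_conflict_set(eligible, jobs, job_completion_time, machine_available):
--     """
--     Steps 2-3: Build the conflict set.
--
--     Step 2: T = minimum earliest completion time across all eligible ops.
--
--     Step 3: Identify machine m* where T is achieved.
--             The conflict set on m* consists of all eligible operations
--             assigned to machine m* whose earliest start time < T.
--
--     Per the paper: "The conflict set of such a facility block will consist
--     of (a) all operations ending at time T, and (b) all operations that
--     overlap the operations found in (a)."
--
--     An operation on m* with ES < T overlaps because it could start before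
--     the earliest-finishing operation on m* completes.
--
--     Returns:
--         conflict_set: list of (job_id, op_index)
--         machine_star: the machine with the conflict
--         T: the minimum earliest completion time
--     """
--     op_info = compute_earliest_times(eligible, jobs, job_completion_time,
--                                      machine_available)
--
--     # Step 2: Find T = minimum EC
--     T = min(ec for (_, _, _, ec) in op_info.values())
--
--     # Identify machine m* where T is achieved
--     machine_star = None
--     for (j, op_idx) in eligible:
--         m, p, es, ec = op_info[(j, op_idx)]
--         if ec == T:
--             machine_star = m
--             break
--
--     # Step 3: Conflict set = all eligible ops on m* with ES < T
--     conflict_set = []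
--     for (j, op_idx) in eligible:
--         m, p, es, ec = op_info[(j, op_idx)]
--         if m == machine_star and es < T:
--             conflict_set.append((j, op_idx))
--
--     return conflict_set, machine_star, T
-- ===== SOURCE B (Python) =====
-- def build_conflict_set(eligible, jobs, job_completion_time, machine_available):
--     """One grouping pass: bucket eligible ops by machine while tracking the
--     running minimum earliest-completion time (T) and its machine (m*, first
--     achiever in eligible order); the conflict set then comes from m*'s bucket
--     alone instead of re-scanning all eligible ops."""
--     buckets = {}
--     best = None  # (T, machine_star) so far; updated only on strict improvement
--     for (j, op_idx) in eligible:
--         m, p = jobs[j][op_idx]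
--         es = max(job_completion_time[j], machine_available[m])
--         ec = es + p
--         buckets.setdefault(m, []).append((j, op_idx, es))
--         if best is None or ec < best[0]:
--             best = (ec, m)
--     T, machine_star = best
--     conflict_set = [(j, op_idx) for (j, op_idx, es) in buckets[machine_star] if es < T]
--     return conflict_set, machine_star, T
-- ===== Notes on version B (the rewrite author's own statement) =====
-- stated objective: alternative
-- what changed: Replaced the per-op info dict plus three separate scans (min over dict values, first-achiever scan, conflict re-scan of all eligible ops) by a single grouping pass that buckets eligible ops by machine while tracking the running minimum EC and its first-achieving machine, then reads the conflict set off the chosen machine's bucket alone.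
-- outside the precondition, e.g. on build_conflict_set([], [[(0, 1)]], [0], [0]): A raises ValueError, B raises TypeError; on build_conflict_set([(2, 0)], [[(0, 1)]], [0], [0]): A raises IndexError, B raises IndexError
import Mathlib
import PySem

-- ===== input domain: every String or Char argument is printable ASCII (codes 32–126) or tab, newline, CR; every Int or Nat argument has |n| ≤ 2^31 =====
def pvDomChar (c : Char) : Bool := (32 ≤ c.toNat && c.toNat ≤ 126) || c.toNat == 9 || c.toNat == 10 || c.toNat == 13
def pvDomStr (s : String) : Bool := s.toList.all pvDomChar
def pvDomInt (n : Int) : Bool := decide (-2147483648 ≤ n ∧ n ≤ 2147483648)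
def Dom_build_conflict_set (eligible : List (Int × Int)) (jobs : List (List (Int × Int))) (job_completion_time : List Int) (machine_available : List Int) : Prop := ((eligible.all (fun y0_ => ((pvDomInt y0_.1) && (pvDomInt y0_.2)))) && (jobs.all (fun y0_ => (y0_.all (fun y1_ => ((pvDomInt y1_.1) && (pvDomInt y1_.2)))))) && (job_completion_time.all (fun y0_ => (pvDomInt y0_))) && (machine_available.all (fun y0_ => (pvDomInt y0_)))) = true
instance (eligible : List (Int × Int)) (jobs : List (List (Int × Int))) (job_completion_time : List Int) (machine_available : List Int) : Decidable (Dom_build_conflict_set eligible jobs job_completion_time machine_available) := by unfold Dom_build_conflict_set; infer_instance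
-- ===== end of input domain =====

-- B replaces A's per-op dict plus three scans by ONE grouping pass (per-machine buckets + running minimum EC with its machine),
-- reading the conflict set off the chosen machine's bucket; objective: alternative decomposition, same return value.

-- ===== PORT A =====
-- literal port of compute_earliest_times: dict (j,op) -> (m, p, ES, EC); out-of-range indexing (Python IndexError) is excluded by Pre_
def compute_earliest_times (eligible : List (Int × Int)) (jobs : List (List (Int × Int))) (job_completion_time : List Int) (machine_available : List Int) : PySem.Dict (Int × Int) (Int × Int × Int × Int) :=
  eligible.foldl (fun info p =>
    let mp := PySem.List.pyGetD (PySem.List.pyGetD jobs p.1 []) p.2 (0, 0)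
    let es := max (PySem.List.pyGetD job_completion_time p.1 0) (PySem.List.pyGetD machine_available mp.1 0)
    info.insert p (mp.1, mp.2, es, es + mp.2)) PySem.Dict.empty

def build_conflict_set (eligible : List (Int × Int)) (jobs : List (List (Int × Int))) (job_completion_time : List Int) (machine_available : List Int) : (List (Int × Int)) × Int × Int :=
  let op_info := compute_earliest_times eligible jobs job_completion_time machine_available
  -- Step 2: T = min EC over op_info.values() (Python min raises on empty: excluded by Pre_)
  let ecs := op_info.values.map (fun v => v.2.2.2)
  match PySem.List.min? ecs (fun x => x) with
  | none => ([], 0, 0)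
  | some T =>
    -- first eligible op with ec == T, break
    let machine_star : Int :=
      match eligible.find? (fun p => (op_info.getD p (0, 0, 0, 0)).2.2.2 == T) with
      | some p => (op_info.getD p (0, 0, 0, 0)).1
      | none => 0   -- Python's None; unreachable: some ec equals the minimum
    -- Step 3: all eligible ops on m* with ES < T
    let conflict_set := eligible.filter (fun p =>
      let v := op_info.getD p (0, 0, 0, 0)
      v.1 == machine_star && decide (v.2.2.1 < T))
    (conflict_set, machine_star, T)

-- ===== PORT B =====
def build_conflict_set_alt (eligible : List (Int × Int)) (jobs : List (List (Int × Int))) (job_completion_time : List Int) (machine_available : List Int) : (List (Int × Int)) × Int × Int :=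
  -- single grouping pass: buckets[m] = list of (j, op, es); best = (running min EC, its machine)
  let st := eligible.foldl (fun (st : PySem.Dict Int (List (Int × Int × Int)) × Option (Int × Int)) p =>
      let mp := PySem.List.pyGetD (PySem.List.pyGetD jobs p.1 []) p.2 (0, 0)
      let es := max (PySem.List.pyGetD job_completion_time p.1 0) (PySem.List.pyGetD machine_available mp.1 0)
      let ec := es + mp.2
      let buckets := st.1.modify mp.1 [] (fun b => b ++ [(p.1, p.2, es)])   -- setdefault(m, []).append(...)
      let best := match st.2 with
        | none => some (ec, mp.1)
        | some b => if ec < b.1 then some (ec, mp.1) else some b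
      (buckets, best))
    (PySem.Dict.empty, none)
  match st.2 with
  | none => ([], 0, 0)   -- eligible empty: Python B raises like A; excluded by Pre_
  | some b =>
    ((st.1.getD b.2 []).filterMap (fun q => if q.2.2 < b.1 then some (q.1, q.2.1) else none), b.2, b.1)

-- ===== PRECONDITION & SPEC =====
-- Pre_ excludes exactly the inputs where Python A raises: empty eligible (min() ValueError) and
-- any eligible pair whose job/op/machine index is out of range (IndexError).
def Pre_build_conflict_set (eligible : List (Int × Int)) (jobs : List (List (Int × Int))) (job_completion_time : List Int) (machine_available : List Int) : Prop :=
  eligible ≠ [] ∧ ∀ p ∈ eligible,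
    PySem.Raise.InRange jobs.length p.1 ∧
    PySem.Raise.InRange (PySem.List.pyGetD jobs p.1 []).length p.2 ∧
    PySem.Raise.InRange job_completion_time.length p.1 ∧
    PySem.Raise.InRange machine_available.length (PySem.List.pyGetD (PySem.List.pyGetD jobs p.1 []) p.2 (0, 0)).1
instance (eligible : List (Int × Int)) (jobs : List (List (Int × Int))) (job_completion_time : List Int) (machine_available : List Int) : Decidable (Pre_build_conflict_set eligible jobs job_completion_time machine_available) := by unfold Pre_build_conflict_set; infer_instance

def pvWitness_build_conflict_set : (List (Int × Int)) × (List (List (Int × Int))) × List Int × List Int :=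
  ([(0, 0), (1, 0)], [[(0, 2)], [(0, 1)]], [0, 0], [0])

def Spec_build_conflict_set (eligible : List (Int × Int)) (jobs : List (List (Int × Int))) (job_completion_time : List Int) (machine_available : List Int) (out : (List (Int × Int)) × Int × Int) : Prop := out = build_conflict_set_alt eligible jobs job_completion_time machine_available
instance (eligible : List (Int × Int)) (jobs : List (List (Int × Int))) (job_completion_time : List Int) (machine_available : List Int) (out : (List (Int × Int)) × Int × Int) : Decidable (Spec_build_conflict_set eligible jobs job_completion_time machine_available out) := by unfold Spec_build_conflict_set; infer_instance

-- ===== CLAIM (what is proved, stated in full; the proofs are below) =====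
def Claim_equal_build_conflict_set : Prop := ∀ (eligible : List (Int × Int)) (jobs : List (List (Int × Int))) (job_completion_time : List Int) (machine_available : List Int), Dom_build_conflict_set eligible jobs job_completion_time machine_available → Pre_build_conflict_set eligible jobs job_completion_time machine_available → Spec_build_conflict_set eligible jobs job_completion_time machine_available (build_conflict_set eligible jobs job_completion_time machine_available)

-- ===== LEMMAS AND PROOFS =====

-- the per-op record (machine, proc time, ES, EC) both programs compute for an eligible pair
def pvOp (jobs : List (List (Int × Int))) (job_completion_time : List Int) (machine_available : List Int) (p : Int × Int) : Int × Int × Int × Int :=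
  let mp := PySem.List.pyGetD (PySem.List.pyGetD jobs p.1 []) p.2 (0, 0)
  let es := max (PySem.List.pyGetD job_completion_time p.1 0) (PySem.List.pyGetD machine_available mp.1 0)
  (mp.1, mp.2, es, es + mp.2)

-- B's bucket-update and best-update steps, written through pvOp
def pvBStep (jobs : List (List (Int × Int))) (jct ma : List Int) (d : PySem.Dict Int (List (Int × Int × Int))) (p : Int × Int) : PySem.Dict Int (List (Int × Int × Int)) :=
  d.modify (pvOp jobs jct ma p).1 [] (fun b => b ++ [(p.1, p.2, (pvOp jobs jct ma p).2.2.1)])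
def pvOStep (jobs : List (List (Int × Int))) (jct ma : List Int) (acc : Option (Int × Int)) (p : Int × Int) : Option (Int × Int) :=
  match acc with
  | none => some ((pvOp jobs jct ma p).2.2.2, (pvOp jobs jct ma p).1)
  | some b => if (pvOp jobs jct ma p).2.2.2 < b.1 then some ((pvOp jobs jct ma p).2.2.2, (pvOp jobs jct ma p).1) else some b

theorem pv_cet_eq (eligible : List (Int × Int)) (jobs : List (List (Int × Int))) (jct ma : List Int) :
    compute_earliest_times eligible jobs jct ma
      = eligible.foldl (fun d p => d.insert p (pvOp jobs jct ma p)) PySem.Dict.empty := rfl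

theorem pv_getfold (jobs : List (List (Int × Int))) (jct ma : List Int) (l : List (Int × Int)) :
    ∀ (d : PySem.Dict (Int × Int) (Int × Int × Int × Int)) (q : Int × Int),
      (l.foldl (fun d p => d.insert p (pvOp jobs jct ma p)) d).get? q
        = if q ∈ l then some (pvOp jobs jct ma q) else d.get? q := by
  induction l with
  | nil => intro d q; simp
  | cons p t ih =>
    intro d q
    simp only [List.foldl_cons, List.mem_cons]
    rw [ih]
    by_cases hqt : q ∈ t
    · simp [hqt]
    · by_cases hqp : q = p
      · subst hqp; simp [hqt]
      · simp [hqt, hqp, PySem.Dict.get?_insert]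

theorem pv_getDfold (jobs : List (List (Int × Int))) (jct ma : List Int) (l : List (Int × Int)) (q : Int × Int) (h : q ∈ l) :
    (l.foldl (fun d p => d.insert p (pvOp jobs jct ma p)) PySem.Dict.empty).getD q (0, 0, 0, 0) = pvOp jobs jct ma q := by
  rw [PySem.Dict.getD_eq_get?_getD, pv_getfold, if_pos h]
  rfl

theorem pv_values (jobs : List (List (Int × Int))) (jct ma : List Int) (l : List (Int × Int)) :
    (l.foldl (fun d p => d.insert p (pvOp jobs jct ma p)) (PySem.Dict.empty : PySem.Dict (Int × Int) (Int × Int × Int × Int))).values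
      = (PySem.Set.ofList l).map (pvOp jobs jct ma) := by
  have hkeys : (l.foldl (fun d p => d.insert p (pvOp jobs jct ma p)) (PySem.Dict.empty : PySem.Dict (Int × Int) (Int × Int × Int × Int))).keys = PySem.Set.ofList l := by
    rw [PySem.Dict.keys_foldl_insert]
    simp [PySem.Set.update_nil_left]
  have hnd : (l.foldl (fun d p => d.insert p (pvOp jobs jct ma p)) (PySem.Dict.empty : PySem.Dict (Int × Int) (Int × Int × Int × Int))).keys.Nodup := by
    rw [hkeys]; exact PySem.Set.nodup_ofList l
  rw [PySem.Dict.values_eq_map_keys _ hnd (0, 0, 0, 0), hkeys]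
  apply List.map_congr_left
  intro k hk
  exact pv_getDfold jobs jct ma l k ((PySem.Set.mem_ofList l k).mp hk)

theorem pv_foldl_min_le (xs : List Int) : ∀ (a : Int), xs.foldl min a ≤ a := by
  induction xs with
  | nil => intro a; simp
  | cons x t ih =>
    intro a
    simp only [List.foldl_cons]
    exact le_trans (ih (min a x)) (min_le_left a x)

theorem pv_foldl_min_mem (xs : List Int) : ∀ (a : Int), xs.foldl min a ∈ a :: xs := by
  induction xs with
  | nil => intro a; simp
  | cons x t ih =>
    intro a
    simp only [List.foldl_cons]
    rcases min_choice a x with h | h <;> rw [h]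
    · rcases List.mem_cons.mp (ih a) with h2 | h2
      · simp [h2]
      · simp [h2]
    · rcases List.mem_cons.mp (ih x) with h2 | h2
      · simp [h2]
      · simp [h2]

theorem pv_foldl_min_le_mem (xs : List Int) : ∀ (a z : Int), z ∈ a :: xs → xs.foldl min a ≤ z := by
  induction xs with
  | nil =>
    intro a z hz
    rw [List.mem_singleton] at hz
    simp [hz]
  | cons x t ih =>
    intro a z hz
    simp only [List.foldl_cons]
    rcases List.mem_cons.mp hz with h | h
    · exact le_trans (pv_foldl_min_le t (min a x)) (by rw [h]; exact min_le_left a x)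
    · rcases List.mem_cons.mp h with h2 | h2
      · exact le_trans (pv_foldl_min_le t (min a x)) (by rw [h2]; exact min_le_right a x)
      · exact ih (min a x) z (List.mem_cons_of_mem _ h2)

-- Python min over an Int list: none for [], else the minimum value
def pvListMin? (xs : List Int) : Option Int :=
  match xs with
  | [] => none
  | x :: t => some (t.foldl min x)

theorem pv_minfold_some (xs : List Int) : ∀ (a : Int),
    List.foldl (fun acc x => match acc with
      | none => some x
      | some m => if x < m then some x else some m) (some a) xs
      = some (xs.foldl min a) := by
  induction xs with
  | nil => intro a; simp
  | cons x t ih =>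
    intro a
    simp only [List.foldl_cons]
    by_cases hxa : x < a
    · rw [if_pos hxa, ih x, min_eq_right hxa.le]
    · rw [if_neg hxa, ih a, min_eq_left (by omega)]

theorem pv_min?_eq (xs : List Int) :
    PySem.List.min? xs (fun x => x) = pvListMin? xs := by
  cases xs with
  | nil => rfl
  | cons x t =>
    unfold PySem.List.min? pvListMin?
    simp only [List.foldl_cons]
    refine Eq.trans ?_ (pv_minfold_some t x)
    apply PySem.List.foldl_congr_mem
    intro acc y _
    cases acc <;> rfl

theorem pv_min?_set_eq (xs ys : List Int) (h : ∀ z, z ∈ xs ↔ z ∈ ys) : pvListMin? xs = pvListMin? ys := by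
  cases xs with
  | nil =>
    cases ys with
    | nil => rfl
    | cons y t => exact absurd ((h y).mpr (List.mem_cons_self)) (List.not_mem_nil)
  | cons x s =>
    cases ys with
    | nil => exact absurd ((h x).mp (List.mem_cons_self)) (List.not_mem_nil)
    | cons y t =>
      have h1 : s.foldl min x ∈ y :: t := (h _).mp (pv_foldl_min_mem s x)
      have h2 : t.foldl min y ∈ x :: s := (h _).mpr (pv_foldl_min_mem t y)
      have h3 := pv_foldl_min_le_mem s x _ h2
      have h4 := pv_foldl_min_le_mem t y _ h1
      simp only [pvListMin?, Option.some.injEq]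
      omega

-- characterisation of B's best fold
theorem pv_bfold (jobs : List (List (Int × Int))) (jct ma : List Int) (l : List (Int × Int)) :
    ∀ (a : Int) (mm : Int),
      l.foldl (pvOStep jobs jct ma) (some (a, mm))
        = some ((l.map (fun p => (pvOp jobs jct ma p).2.2.2)).foldl min a,
            if (l.map (fun p => (pvOp jobs jct ma p).2.2.2)).foldl min a = a then mm
            else ((l.find? (fun p => (pvOp jobs jct ma p).2.2.2 == (l.map (fun p => (pvOp jobs jct ma p).2.2.2)).foldl min a)).map
                    (fun p => (pvOp jobs jct ma p).1)).getD mm) := by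
  induction l with
  | nil => intro a mm; simp
  | cons p t ih =>
    intro a mm
    simp only [List.foldl_cons, List.map_cons, List.find?_cons]
    have hstep : pvOStep jobs jct ma (some (a, mm)) p
        = if (pvOp jobs jct ma p).2.2.2 < a then some ((pvOp jobs jct ma p).2.2.2, (pvOp jobs jct ma p).1) else some (a, mm) := rfl
    rw [hstep]
    by_cases h : (pvOp jobs jct ma p).2.2.2 < a
    · rw [if_pos h, ih, min_eq_right h.le]
      have hle := pv_foldl_min_le (t.map (fun p => (pvOp jobs jct ma p).2.2.2)) ((pvOp jobs jct ma p).2.2.2)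
      have hTa : ¬ ((t.map (fun p => (pvOp jobs jct ma p).2.2.2)).foldl min ((pvOp jobs jct ma p).2.2.2) = a) := by omega
      rw [if_neg hTa]
      by_cases hq : (t.map (fun p => (pvOp jobs jct ma p).2.2.2)).foldl min ((pvOp jobs jct ma p).2.2.2) = (pvOp jobs jct ma p).2.2.2
      · rw [if_pos hq]
        have : ((pvOp jobs jct ma p).2.2.2 == (t.map (fun p => (pvOp jobs jct ma p).2.2.2)).foldl min ((pvOp jobs jct ma p).2.2.2)) = true := by
          simp [hq]
        simp [this]
      · rw [if_neg hq]
        have hbeq : ((pvOp jobs jct ma p).2.2.2 == (t.map (fun p => (pvOp jobs jct ma p).2.2.2)).foldl min ((pvOp jobs jct ma p).2.2.2)) = false := by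
          simp; omega
        rw [hbeq]
        -- find? t succeeds: the min is attained in t
        rcases List.mem_cons.mp (pv_foldl_min_mem (t.map (fun p => (pvOp jobs jct ma p).2.2.2)) ((pvOp jobs jct ma p).2.2.2)) with hm | hm
        · exact absurd hm hq
        · rcases List.mem_map.mp hm with ⟨w, hw, hwe⟩
          have hsome : (t.find? (fun p' => (pvOp jobs jct ma p').2.2.2 == (t.map (fun p => (pvOp jobs jct ma p).2.2.2)).foldl min ((pvOp jobs jct ma p).2.2.2))).isSome := by
            rw [List.find?_isSome]
            exact ⟨w, hw, by simp [hwe]⟩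
          cases hfind : t.find? (fun p' => (pvOp jobs jct ma p').2.2.2 == (t.map (fun p => (pvOp jobs jct ma p).2.2.2)).foldl min ((pvOp jobs jct ma p).2.2.2)) with
          | none => rw [hfind] at hsome; simp at hsome
          | some w' => simp
    · rw [if_neg h, ih a mm, min_eq_left (by omega)]
      by_cases hq : (t.map (fun p => (pvOp jobs jct ma p).2.2.2)).foldl min a = a
      · rw [if_pos hq, if_pos hq]
      · rw [if_neg hq, if_neg hq]
        have hle := pv_foldl_min_le (t.map (fun p => (pvOp jobs jct ma p).2.2.2)) a
        have hbeq : ((pvOp jobs jct ma p).2.2.2 == (t.map (fun p => (pvOp jobs jct ma p).2.2.2)).foldl min a) = false := by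
          simp; omega
        rw [hbeq]

-- the bucket of machine c after B's grouping fold
theorem pv_bucket (jobs : List (List (Int × Int))) (jct ma : List Int) (l : List (Int × Int)) (c : Int) :
    (l.foldl (pvBStep jobs jct ma) PySem.Dict.empty).getD c []
      = (l.filter (fun p => (pvOp jobs jct ma p).1 == c)).map (fun p => (p.1, p.2, (pvOp jobs jct ma p).2.2.1)) := by
  rw [show l.foldl (pvBStep jobs jct ma) PySem.Dict.empty
      = (l.map (fun p => ((pvOp jobs jct ma p).1, (p.1, p.2, (pvOp jobs jct ma p).2.2.1)))).foldl
          (fun d q => d.modify q.1 [] (fun b => b ++ [q.2])) PySem.Dict.empty by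
    rw [List.foldl_map]; rfl]
  rw [PySem.Dict.getD_foldl_modify_append]
  simp only [PySem.Dict.getD_empty, List.nil_append, List.filter_map, List.map_map]
  rfl

theorem pv_filter_split (l : List (Int × Int)) (q : Int × Int → Bool) (T : Int) (es : Int × Int → Int) :
    (l.filter q).filterMap (fun p => if es p < T then some (p.1, p.2) else none)
      = l.filter (fun p => q p && decide (es p < T)) := by
  induction l with
  | nil => rfl
  | cons p t ih =>
    by_cases hq : q p
    · by_cases hes : es p < T
      · simp [hq, hes, ih]
      · simp [hq, hes, ih]
    · simp [hq, ih]

theorem pv_find?_congr (l : List (Int × Int)) (f g : Int × Int → Bool) (h : ∀ x ∈ l, f x = g x) :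
    l.find? f = l.find? g := by
  induction l with
  | nil => rfl
  | cons x t ih =>
    have hx := h x List.mem_cons_self
    cases hgx : g x with
    | true => simp [hx, hgx]
    | false =>
      simp only [List.find?_cons, hx, hgx]
      exact ih (fun y hy => h y (List.mem_cons_of_mem _ hy))

theorem pv_alt_eq (eligible : List (Int × Int)) (jobs : List (List (Int × Int))) (jct ma : List Int) :
    build_conflict_set_alt eligible jobs jct ma
      = (match (eligible.foldl (pvOStep jobs jct ma) none) with
        | none => ([], 0, 0)
        | some b => (((eligible.foldl (pvBStep jobs jct ma) PySem.Dict.empty).getD b.2 []).filterMap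
            (fun q => if q.2.2 < b.1 then some (q.1, q.2.1) else none), b.2, b.1)) := by
  have hsplit : eligible.foldl (fun (st : PySem.Dict Int (List (Int × Int × Int)) × Option (Int × Int)) p =>
        (pvBStep jobs jct ma st.1 p, pvOStep jobs jct ma st.2 p)) (PySem.Dict.empty, none)
      = (eligible.foldl (pvBStep jobs jct ma) PySem.Dict.empty, eligible.foldl (pvOStep jobs jct ma) none) := by
    rw [PySem.List.foldl_prod_mk]
  calc build_conflict_set_alt eligible jobs jct ma
      = (match (eligible.foldl (fun (st : PySem.Dict Int (List (Int × Int × Int)) × Option (Int × Int)) p =>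
            (pvBStep jobs jct ma st.1 p, pvOStep jobs jct ma st.2 p)) (PySem.Dict.empty, none)).2 with
        | none => ([], 0, 0)
        | some b => (((eligible.foldl (fun (st : PySem.Dict Int (List (Int × Int × Int)) × Option (Int × Int)) p =>
            (pvBStep jobs jct ma st.1 p, pvOStep jobs jct ma st.2 p)) (PySem.Dict.empty, none)).1.getD b.2 []).filterMap
            (fun q => if q.2.2 < b.1 then some (q.1, q.2.1) else none), b.2, b.1)) := rfl
    _ = _ := by rw [hsplit]

theorem pv_eq_all (eligible : List (Int × Int)) (jobs : List (List (Int × Int))) (jct ma : List Int) :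
    build_conflict_set eligible jobs jct ma = build_conflict_set_alt eligible jobs jct ma := by
  cases eligible with
  | nil => rfl
  | cons p0 rest =>
    have hmem : ∀ z, z ∈ ((PySem.Set.ofList (p0 :: rest)).map ((fun (v : Int × Int × Int × Int) => v.2.2.2) ∘ pvOp jobs jct ma))
        ↔ z ∈ ((p0 :: rest).map ((fun (v : Int × Int × Int × Int) => v.2.2.2) ∘ pvOp jobs jct ma)) := by
      intro z
      simp only [List.mem_map]
      constructor
      · rintro ⟨w, hw, rfl⟩; exact ⟨w, (PySem.Set.mem_ofList _ _).mp hw, rfl⟩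
      · rintro ⟨w, hw, rfl⟩; exact ⟨w, (PySem.Set.mem_ofList _ _).mpr hw, rfl⟩
    have hAmin : PySem.List.min? ((((p0 :: rest).foldl (fun d p => d.insert p (pvOp jobs jct ma p)) PySem.Dict.empty).values).map (fun v => v.2.2.2)) (fun x => x)
        = some ((rest.map (fun p => (pvOp jobs jct ma p).2.2.2)).foldl min ((pvOp jobs jct ma p0).2.2.2)) := by
      rw [pv_values, List.map_map, pv_min?_eq,
        pv_min?_set_eq _ ((p0 :: rest).map ((fun (v : Int × Int × Int × Int) => v.2.2.2) ∘ pvOp jobs jct ma)) hmem]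
      rfl
    have hBbest : (p0 :: rest).foldl (pvOStep jobs jct ma) none
        = some ((rest.map (fun p => (pvOp jobs jct ma p).2.2.2)).foldl min ((pvOp jobs jct ma p0).2.2.2),
            if (rest.map (fun p => (pvOp jobs jct ma p).2.2.2)).foldl min ((pvOp jobs jct ma p0).2.2.2) = (pvOp jobs jct ma p0).2.2.2 then (pvOp jobs jct ma p0).1
            else ((rest.find? (fun p => (pvOp jobs jct ma p).2.2.2 == (rest.map (fun p => (pvOp jobs jct ma p).2.2.2)).foldl min ((pvOp jobs jct ma p0).2.2.2))).map
                    (fun p => (pvOp jobs jct ma p).1)).getD ((pvOp jobs jct ma p0).1)) := by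
      rw [List.foldl_cons,
        show pvOStep jobs jct ma none p0 = some ((pvOp jobs jct ma p0).2.2.2, (pvOp jobs jct ma p0).1) from rfl,
        pv_bfold]
    rw [pv_alt_eq]
    simp only [build_conflict_set, pv_cet_eq, hAmin, hBbest]
    set F := List.foldl (fun d p => d.insert p (pvOp jobs jct ma p)) PySem.Dict.empty (p0 :: rest) with hF
    set T := List.foldl min (pvOp jobs jct ma p0).2.2.2 (List.map (fun p => (pvOp jobs jct ma p).2.2.2) rest) with hT
    have hgetD : ∀ x ∈ p0 :: rest, F.getD x (0, 0, 0, 0) = pvOp jobs jct ma x := fun x hx => by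
      rw [hF]; exact pv_getDfold jobs jct ma (p0 :: rest) x hx
    have hfc : List.find? (fun p => (F.getD p (0, 0, 0, 0)).2.2.2 == T) (p0 :: rest)
        = List.find? (fun p => (pvOp jobs jct ma p).2.2.2 == T) (p0 :: rest) :=
      pv_find?_congr _ _ _ (fun x hx => by rw [hgetD x hx])
    rw [hfc]
    have hMach : (match List.find? (fun p => (pvOp jobs jct ma p).2.2.2 == T) (p0 :: rest) with
        | some p => (F.getD p (0, 0, 0, 0)).1
        | none => 0)
        = (if T = (pvOp jobs jct ma p0).2.2.2 then (pvOp jobs jct ma p0).1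
           else (Option.map (fun p => (pvOp jobs jct ma p).1)
              (List.find? (fun p => (pvOp jobs jct ma p).2.2.2 == T) rest)).getD (pvOp jobs jct ma p0).1) := by
      by_cases h0 : (pvOp jobs jct ma p0).2.2.2 = T
      · rw [show List.find? (fun p => (pvOp jobs jct ma p).2.2.2 == T) (p0 :: rest) = some p0 from by
            simp [h0]]
        show (F.getD p0 (0, 0, 0, 0)).1 = _
        rw [hgetD p0 List.mem_cons_self, if_pos h0.symm]
      · have hstep : List.find? (fun p => (pvOp jobs jct ma p).2.2.2 == T) (p0 :: rest)
            = List.find? (fun p => (pvOp jobs jct ma p).2.2.2 == T) rest := by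
          simp [h0]
        rw [hstep, if_neg (fun hc => h0 hc.symm)]
        have hTmem := pv_foldl_min_mem (rest.map (fun p => (pvOp jobs jct ma p).2.2.2)) ((pvOp jobs jct ma p0).2.2.2)
        rw [← hT] at hTmem
        rcases List.mem_cons.mp hTmem with h1 | h1
        · exact absurd h1.symm h0
        · rcases List.mem_map.mp h1 with ⟨w, hw, hwe⟩
          have hsome : (List.find? (fun p => (pvOp jobs jct ma p).2.2.2 == T) rest).isSome := by
            rw [List.find?_isSome]; exact ⟨w, hw, by simp [hwe]⟩
          cases hfind2 : List.find? (fun p => (pvOp jobs jct ma p).2.2.2 == T) rest with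
          | none => rw [hfind2] at hsome; simp at hsome
          | some w' =>
            show (F.getD w' (0, 0, 0, 0)).1 = _
            rw [hgetD w' (List.mem_cons_of_mem _ (List.mem_of_find?_eq_some hfind2))]
            simp
    rw [hMach]
    set M := if T = (pvOp jobs jct ma p0).2.2.2 then (pvOp jobs jct ma p0).1
        else (Option.map (fun p => (pvOp jobs jct ma p).1)
          (List.find? (fun p => (pvOp jobs jct ma p).2.2.2 == T) rest)).getD (pvOp jobs jct ma p0).1 with hM
    simp only [Prod.mk.injEq, and_true]
    have hBside : List.filterMap (fun x : Int × Int × Int => if x.2.2 < T then some (x.1, x.2.1) else none)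
        ((List.foldl (pvBStep jobs jct ma) PySem.Dict.empty (p0 :: rest)).getD M [])
        = List.filter (fun p => (pvOp jobs jct ma p).1 == M && decide ((pvOp jobs jct ma p).2.2.1 < T)) (p0 :: rest) := by
      rw [pv_bucket jobs jct ma (p0 :: rest) M, List.filterMap_map,
        show ((fun (x : Int × Int × Int) => if x.2.2 < T then some (x.1, x.2.1) else none) ∘
            (fun (p : Int × Int) => (p.1, p.2, (pvOp jobs jct ma p).2.2.1)))
          = (fun (p : Int × Int) => if (pvOp jobs jct ma p).2.2.1 < T then some (p.1, p.2) else none) from rfl]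
      exact pv_filter_split (p0 :: rest) (fun p => (pvOp jobs jct ma p).1 == M) T (fun p => (pvOp jobs jct ma p).2.2.1)
    rw [hBside]
    apply List.filter_congr
    intro x hx
    have hX := pv_getDfold jobs jct ma (p0 :: rest) x hx
    simp only [hX]

-- ===== VERDICT (by name: the statement is the Claim_ definition above) =====
theorem build_conflict_set_spec : Claim_equal_build_conflict_set := by
  intro eligible jobs jct ma _ _
  unfold Spec_build_conflict_set
  exact pv_eq_all eligible jobs jct ma
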